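-- pv_equiv track=rewrite | github.com/kyucchoi/python-algorithm | level1/완주하지_못한_선수/solution.py | solution
-- ===== SOURCE A (Python) =====
-- def solution(participant, completion):
--     hash_dict = {}
--
--     for person in participant:
--         hash_dict[person] = hash_dict.get(person, 0) + 1
--
--     for person in completion:
--         hash_dict[person] -= 1
--
--     for person, count in hash_dict.items():
--         if count > 0:
--             return person
-- ===== SOURCE B (Python) =====
-- def solution(participant, completion):
--     finished = {person: 0 for person in participant}
--     for person in completion:
--         finished[person] += 1
--     for person in participant:
--         if finished[person] < participant.count(person):
--             return person
-- ===== Notes on version B (the rewrite author's own statement) =====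
-- stated objective: alternative
-- what changed: Instead of one net-count table (count up each participant, decrement per completer, scan the dict items for a positive count), B zero-initialises a completion tally keyed by participant, counts only completions into it, and scans the participant list itself, comparing each tally against a direct participant.count pass.
-- outside the precondition, e.g. on solution(['a'], ['a']): A returns None, B returns None
import Mathlib
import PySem

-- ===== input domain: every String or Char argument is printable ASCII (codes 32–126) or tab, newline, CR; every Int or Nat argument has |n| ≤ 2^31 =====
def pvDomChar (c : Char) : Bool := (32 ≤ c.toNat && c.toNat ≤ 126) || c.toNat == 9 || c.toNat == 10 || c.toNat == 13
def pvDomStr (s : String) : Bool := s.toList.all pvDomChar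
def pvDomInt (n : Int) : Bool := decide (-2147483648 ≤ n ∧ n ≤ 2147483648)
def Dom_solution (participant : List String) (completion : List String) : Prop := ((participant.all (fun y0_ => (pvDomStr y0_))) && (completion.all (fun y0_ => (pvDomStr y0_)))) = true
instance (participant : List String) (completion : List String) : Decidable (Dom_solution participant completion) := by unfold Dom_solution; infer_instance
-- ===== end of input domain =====

-- B replaces A's net-count table (count up, decrement, scan dict items) by a zero-initialised completion tally scanned against direct participant.count passes (alternative algorithm, not faster).

-- ===== PORT A =====
-- hash_dict[person] -= 1 threaded through Option; none = KeyError (person not a key), excluded by Pre_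
def solnSub (od : Option (PySem.Dict String Int)) (person : String) : Option (PySem.Dict String Int) :=
  od.bind fun d => (d.get? person).map fun v => d.insert person (v - 1)

def solution (participant : List String) (completion : List String) : String :=
  let d0 := participant.foldl (fun d person => d.insert person (d.getD person 0 + 1)) PySem.Dict.empty
  match completion.foldl solnSub (some d0) with
  | none => ""          -- KeyError: outside Pre_
  | some d =>
    match d.items.find? (fun pc => decide (0 < pc.2)) with
    | some pc => pc.1
    | none => ""        -- Python returns None here: outside Pre_

-- ===== PORT B =====
-- finished = {person: 0 for person in participant}
def altInit (participant : List String) : PySem.Dict String Int :=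
  participant.foldl (fun d person => d.insert person 0) PySem.Dict.empty

-- finished[person] += 1 threaded through Option; none = KeyError (person not a key), excluded by Pre_
def altTally (acc : Option (PySem.Dict String Int)) (person : String) : Option (PySem.Dict String Int) :=
  acc.bind fun d => (d.get? person).map fun v => d.insert person (v + 1)

-- the final for-loop; falling off the end is Python's None, outside Pre_ (the get? none branch is
-- unreachable: every participant is a key of finished)
def altScanFin (finished : PySem.Dict String Int) (participant : List String) : List String → String
  | [] => ""
  | person :: rest =>
    match finished.get? person with
    | none => ""
    | some v =>
      if v < (PySem.List.count participant person : Int) then person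
      else altScanFin finished participant rest

def solution_alt (participant : List String) (completion : List String) : String :=
  match completion.foldl altTally (some (altInit participant)) with
  | none => ""          -- KeyError: outside Pre_
  | some finished => altScanFin finished participant participant

-- ===== PRECONDITION & SPEC =====
-- Pre_ is exactly the domain on which the Python A returns a str: every completion entry occurs in
-- participant (otherwise hash_dict[person] -= 1 raises KeyError; B's tally raises KeyError there too) and
-- someone has more participations than completions (otherwise both A and B fall through and return None,
-- which is not a str).
def Pre_solution (participant : List String) (completion : List String) : Prop :=
  (∀ x ∈ completion, x ∈ participant) ∧
  ∃ x ∈ participant, completion.count x < participant.count x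

instance (participant : List String) (completion : List String) : Decidable (Pre_solution participant completion) := by
  unfold Pre_solution; infer_instance

def pvWitness_solution : List String × List String := (["mislav", "stanko", "ana"], ["stanko", "ana"])

def Spec_solution (participant : List String) (completion : List String) (out : String) : Prop := out = solution_alt participant completion
instance (participant : List String) (completion : List String) (out : String) : Decidable (Spec_solution participant completion out) := by unfold Spec_solution; infer_instance

-- ===== CLAIM (what is proved, stated in full; the proofs are below) =====
def Claim_equal_solution : Prop := ∀ (participant : List String) (completion : List String), Dom_solution participant completion → Pre_solution participant completion → Spec_solution participant completion (solution participant completion)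

-- ===== LEMMAS AND PROOFS =====

-- the subtract loop never hits a missing key: it equals the corresponding total insert loop
lemma subFold_eq (cs : List String) (d : PySem.Dict String Int)
    (h : ∀ x ∈ cs, d.contains x = true) :
    cs.foldl solnSub (some d) = some (cs.foldl (fun d x => d.insert x (d.getD x 0 - 1)) d) := by
  induction cs generalizing d with
  | nil => rfl
  | cons c cs IH =>
    have hc : d.contains c = true := h c (by simp)
    have hsome : (d.get? c).isSome := by rw [← PySem.Dict.contains_eq_isSome_get?]; exact hc
    obtain ⟨v, hv⟩ := Option.isSome_iff_exists.mp hsome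
    have hgetD : d.getD c 0 = v := by simp [PySem.Dict.getD_eq_get?_getD, hv]
    simp only [List.foldl_cons, solnSub, Option.bind_some, hv, Option.map_some, hgetD]
    exact IH (d.insert c (v - 1)) (fun x hx => by
      rw [PySem.Dict.contains_insert]
      simp [h x (by simp [hx])])

-- the value left at key x after the decrement loop
lemma getD_subfold (cs : List String) (d : PySem.Dict String Int) (x : String) :
    (cs.foldl (fun d x => d.insert x (d.getD x 0 - 1)) d).getD x 0
      = d.getD x 0 - cs.count x := by
  induction cs generalizing d with
  | nil => simp
  | cons c cs IH =>
    rw [List.foldl_cons, IH, PySem.Dict.getD_insert]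
    by_cases hxc : x = c
    · subst hxc
      simp only [List.count_cons_self, if_true]
      push_cast; omega
    · rw [if_neg hxc, List.count_cons_of_ne (fun h => hxc h.symm)]

-- updating a set with elements it already has changes nothing
lemma set_update_of_subset (s : PySem.Set String) (cs : List String)
    (h : ∀ x ∈ cs, x ∈ s) :
    PySem.Set.update s cs = s := by
  rw [PySem.Set.update_eq_append_filter]
  have hnil : (List.filter (fun y => !(PySem.Set.contains s y)) (PySem.Set.ofList cs)) = [] := by
    apply List.filter_eq_nil_iff.mpr
    intro y hy
    have hyc : y ∈ cs := (PySem.Set.mem_ofList cs y).mp hy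
    simpa using h y hyc
  rw [hnil, List.append_nil]

-- dropping copies of an element the predicate rejects does not change find?
lemma find?_discard (p : String → Bool) (x : String) (hx : p x = false) :
    ∀ s : PySem.Set String, (PySem.Set.discard s x).find? p = s.find? p := by
  intro s
  simp only [PySem.Set.discard]
  induction s with
  | nil => rfl
  | cons y ys IH =>
    rw [List.filter_cons]
    by_cases hyx : y = x
    · subst hyx
      simp only [BEq.rfl, Bool.not_true, Bool.false_eq_true, if_false]
      rw [IH, List.find?_cons, hx]
    · have hbeq : (!(y == x)) = true := by simp [hyx]
      rw [if_pos hbeq, List.find?_cons, List.find?_cons]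
      rcases hp : p y with _ | _
      · exact IH
      · rfl

-- find? over the ordered dedup of a list is find? over the list itself
lemma find?_ofList (p : String → Bool) :
    ∀ xs : List String, (PySem.Set.ofList xs).find? p = xs.find? p := by
  intro xs
  induction xs with
  | nil => rfl
  | cons x xs IH =>
    rw [PySem.Set.ofList_cons]
    rcases hp : p x with _ | _
    · simp only [List.find?_cons, hp]
      rw [find?_discard p x hp, IH]
    · simp [hp]

-- A computes: the first distinct participant whose count exceeds their completion count
lemma solution_eq_find (participant completion : List String)
    (hsub : ∀ x ∈ completion, x ∈ participant) :
    solution participant completion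
      = match participant.find?
            (fun k => decide (completion.count k < participant.count k)) with
        | some y => y
        | none => "" := by
  unfold solution
  simp only []
  rw [PySem.Dict.foldl_insert_getD_add_one_eq_counter]
  rw [subFold_eq completion (PySem.Dict.counter participant) (fun x hx => by
    rw [PySem.Dict.contains_counter]
    exact List.contains_iff_mem.mpr (hsub x hx))]
  set d1 := completion.foldl (fun d x => d.insert x (d.getD x 0 - 1)) (PySem.Dict.counter participant) with hd1
  have hkeys : d1.keys = PySem.Set.ofList participant := by
    rw [hd1, PySem.Dict.keys_foldl_insert, PySem.Dict.keys_counter,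
        set_update_of_subset _ _ (fun x hx => (PySem.Set.mem_ofList participant x).mpr (hsub x hx))]
  have hnodup : d1.keys.Nodup := by
    rw [hd1]
    exact PySem.Dict.nodup_keys_foldl_insert _ _ _ (PySem.Dict.nodup_keys_counter participant)
  have hgetD : ∀ k : String, d1.getD k 0 = (participant.count k : Int) - completion.count k := by
    intro k
    rw [hd1, getD_subfold, PySem.Dict.getD_counter]
  have hpred : ((fun pc => decide (0 < pc.2)) ∘ fun k => (k, d1.getD k 0))
      = fun k => decide (completion.count k < participant.count k) := by
    funext k
    simp only [Function.comp]
    apply decide_eq_decide.mpr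
    rw [hgetD]
    omega
  change (match List.find? (fun pc => decide (0 < pc.2)) d1.items with | some pc => pc.1 | none => "") = _
  rw [PySem.Dict.items_eq_map_keys d1 hnodup 0, List.find?_map, hpred, hkeys,
      find?_ofList]
  rcases participant.find? (fun k => decide (completion.count k < participant.count k)) with _ | y
  · rfl
  · rfl

-- every key of finished starts at 0
lemma altInit_getD (participant : List String) (x : String) :
    (altInit participant).getD x 0 = 0 := by
  unfold altInit
  suffices h : ∀ d : PySem.Dict String Int, d.getD x 0 = 0 →
      (participant.foldl (fun d person => d.insert person 0) d).getD x 0 = 0 from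
    h PySem.Dict.empty (by simp)
  induction participant with
  | nil => exact fun d h => h
  | cons p ps IH =>
    intro d h
    rw [List.foldl_cons]
    exact IH _ (by rw [PySem.Dict.getD_insert]; split_ifs <;> simp [h])

-- the keys of finished are the distinct participants
lemma altInit_keys (participant : List String) :
    (altInit participant).keys = PySem.Set.ofList participant := by
  unfold altInit
  rw [PySem.Dict.keys_foldl_insert]
  simp [PySem.Set.update_nil_left]

-- the tally loop never hits a missing key: it equals the corresponding total insert loop
lemma tallyFold_eq (cs : List String) (d : PySem.Dict String Int)
    (h : ∀ x ∈ cs, d.contains x = true) :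
    cs.foldl altTally (some d) = some (cs.foldl (fun d x => d.insert x (d.getD x 0 + 1)) d) := by
  induction cs generalizing d with
  | nil => rfl
  | cons c cs IH =>
    have hc : d.contains c = true := h c (by simp)
    have hsome : (d.get? c).isSome := by rw [← PySem.Dict.contains_eq_isSome_get?]; exact hc
    obtain ⟨v, hv⟩ := Option.isSome_iff_exists.mp hsome
    have hgetD : d.getD c 0 = v := by simp [PySem.Dict.getD_eq_get?_getD, hv]
    simp only [List.foldl_cons, altTally, Option.bind_some, hv, Option.map_some, hgetD]
    exact IH (d.insert c (v + 1)) (fun x hx => by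
      rw [PySem.Dict.contains_insert]
      simp [h x (by simp [hx])])

-- B's final loop is a find? over participant
lemma altScanFin_eq_find (finished : PySem.Dict String Int) (participant : List String) :
    ∀ l : List String, (∀ x ∈ l, finished.contains x = true) →
      altScanFin finished participant l
        = match l.find? (fun k => decide (finished.getD k 0 < (participant.count k : Int))) with
          | some y => y
          | none => "" := by
  intro l
  induction l with
  | nil => exact fun _ => rfl
  | cons x xs IH =>
    intro h
    have hx : finished.contains x = true := h x (by simp)
    have hsome : (finished.get? x).isSome := by rw [← PySem.Dict.contains_eq_isSome_get?]; exact hx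
    obtain ⟨v, hv⟩ := Option.isSome_iff_exists.mp hsome
    have hgetD : finished.getD x 0 = v := by simp [PySem.Dict.getD_eq_get?_getD, hv]
    rw [altScanFin, hv, List.find?_cons, PySem.List.count_eq, hgetD]
    show (if v < ((List.count x participant : Nat) : Int) then x else altScanFin finished participant xs) = _
    by_cases hlt : v < ((List.count x participant : Nat) : Int)
    · rw [if_pos hlt, decide_eq_true hlt]
    · rw [if_neg hlt, decide_eq_false hlt, IH (fun y hy => h y (by simp [hy]))]

-- B computes the same first match
lemma alt_eq_find (participant completion : List String)
    (hsub : ∀ x ∈ completion, x ∈ participant) :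
    solution_alt participant completion
      = match participant.find?
            (fun k => decide (completion.count k < participant.count k)) with
        | some y => y
        | none => "" := by
  unfold solution_alt
  have hmem : ∀ x : String, x ∈ participant → (altInit participant).contains x = true := by
    intro x hx
    rw [PySem.Dict.contains_iff_mem_keys, altInit_keys]
    exact (PySem.Set.mem_ofList participant x).mpr hx
  rw [tallyFold_eq completion (altInit participant) (fun x hx => hmem x (hsub x hx))]
  set fin := completion.foldl (fun d x => d.insert x (d.getD x 0 + 1)) (altInit participant) with hfin
  have hkeys : fin.keys = PySem.Set.ofList participant := by
    rw [hfin, PySem.Dict.keys_foldl_insert, altInit_keys,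
        set_update_of_subset _ _ (fun x hx => (PySem.Set.mem_ofList participant x).mpr (hsub x hx))]
  have hgetD : ∀ k : String, fin.getD k 0 = (altInit participant).getD k 0 + completion.count k := by
    intro k
    rw [hfin, PySem.Dict.getD_foldl_insert_add_one]
  have hcont : ∀ x ∈ participant, fin.contains x = true := by
    intro x hx
    rw [PySem.Dict.contains_iff_mem_keys, hkeys]
    exact (PySem.Set.mem_ofList participant x).mpr hx
  simp only []
  rw [altScanFin_eq_find fin participant participant hcont]
  have hpred : (fun k => decide (fin.getD k 0 < (participant.count k : Int)))
      = fun k => decide (completion.count k < participant.count k) := by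
    funext k
    apply decide_eq_decide.mpr
    rw [hgetD k, altInit_getD]
    omega
  rw [hpred]

-- ===== VERDICT (by name: the statement is the Claim_ definition above) =====
theorem solution_spec : Claim_equal_solution := by
  intro participant completion _ hpre
  unfold Spec_solution
  rw [solution_eq_find participant completion hpre.1, alt_eq_find participant completion hpre.1]
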